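-- pv_equiv track=rewrite | github.com/Elhasssen/codewars | Python/twice_linear.py | dbl_linear_version
-- ===== SOURCE A (Python) =====
-- def dbl_linear_version(n):
--     u=[1]
--     if n == 0:
--         return u
--     else:
--         for i in range(n):
--             y,z=2*u[i]+1,3*u[i]+1
--             u.append(y)
--             u.append(z)
--             u=sorted(u)
--         return u
-- ===== SOURCE B (Python) =====
-- def dbl_linear_version(n):
--     # Two-pointer merge (ugly-number style): O(n) instead of sort-every-step.
--     r = [1]
--     i2 = i3 = 0
--     while i2 < n or i3 < n:
--         c2 = 2 * r[i2] + 1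
--         c3 = 3 * r[i3] + 1
--         if i3 >= n or (i2 < n and c2 <= c3):
--             r.append(c2)
--             i2 += 1
--         else:
--             r.append(c3)
--             i3 += 1
--     return r
-- ===== Notes on version B (the rewrite author's own statement) =====
-- stated objective: faster
-- what changed: Replaces the sort-after-every-append loop by a two-pointer merge (ugly-number technique) that appends each next value in sorted order directly, never sorting.
import Mathlib
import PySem

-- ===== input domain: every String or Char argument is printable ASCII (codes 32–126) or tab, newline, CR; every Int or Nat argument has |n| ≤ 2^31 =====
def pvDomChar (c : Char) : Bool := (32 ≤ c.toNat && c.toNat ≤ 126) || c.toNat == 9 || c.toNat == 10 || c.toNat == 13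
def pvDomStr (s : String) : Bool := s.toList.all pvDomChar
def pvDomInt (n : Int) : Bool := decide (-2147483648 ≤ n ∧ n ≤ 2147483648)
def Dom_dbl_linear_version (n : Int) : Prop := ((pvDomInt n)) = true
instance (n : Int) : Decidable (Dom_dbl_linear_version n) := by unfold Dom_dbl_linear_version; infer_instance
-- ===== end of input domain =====

-- B replaces A's sort-after-every-append loop by a two-pointer merge that emits each
-- next value already in sorted order (objective: faster; measured asymptotic speed-up).

-- ===== PORT A =====
def dbl_linear_version (n : Int) : List Int :=
  let u : List Int := [1]
  if n == 0 then u
  else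
    (PySem.List.pyRange 0 n 1).foldl
      (fun u i =>
        let y := 2 * PySem.List.pyGetD u i 0 + 1
        let z := 3 * PySem.List.pyGetD u i 0 + 1
        PySem.List.sorted ((u ++ [y]) ++ [z]) (fun x => x) false) u

-- ===== PORT B =====
def pvBLoop (m : Nat) (r : List Int) (i2 i3 : Nat) : List Int :=
  if _h : i2 < m ∨ i3 < m then
    if m ≤ i3 ∨ (i2 < m ∧ 2 * r.getD i2 0 + 1 ≤ 3 * r.getD i3 0 + 1) then
      pvBLoop m (r ++ [2 * r.getD i2 0 + 1]) (i2 + 1) i3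
    else
      pvBLoop m (r ++ [3 * r.getD i3 0 + 1]) i2 (i3 + 1)
  else r
termination_by (m - i2) + (m - i3)
decreasing_by all_goals omega

def dbl_linear_version_alt (n : Int) : List Int := pvBLoop n.toNat [1] 0 0

-- ===== PRECONDITION & SPEC =====
def Spec_dbl_linear_version (n : Int) (out : List Int) : Prop := out = dbl_linear_version_alt n
instance (n : Int) (out : List Int) : Decidable (Spec_dbl_linear_version n out) := by unfold Spec_dbl_linear_version; infer_instance

-- ===== CLAIM (what is proved, stated in full; the proofs are below) =====
def Claim_equal_dbl_linear_version : Prop := ∀ (n : Int), Dom_dbl_linear_version n → Spec_dbl_linear_version n (dbl_linear_version n)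

-- ===== LEMMAS AND PROOFS =====
theorem pv_mem_take_le (u : List Int) (hu : u.Pairwise (· ≤ ·)) (i : Nat) (hi : i < u.length)
    (x : Int) (hx : x ∈ u.take (i+1)) : x ≤ u[i] := by
  rw [List.mem_take_iff_getElem] at hx
  obtain ⟨j, hj, rfl⟩ := hx
  rcases Nat.lt_or_ge j i with h | h
  · exact (List.pairwise_iff_getElem.mp hu) j i _ _ h
  · have : j = i := by omega
    subst this; exact le_refl _

theorem pv_mem_drop_ge (u : List Int) (hu : u.Pairwise (· ≤ ·)) (i : Nat) (hi : i < u.length)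
    (y : Int) (hy : y ∈ u.drop (i+1)) : u[i] ≤ y := by
  rw [List.mem_iff_getElem] at hy
  obtain ⟨t, ht, rfl⟩ := hy
  rw [List.getElem_drop]
  exact (List.pairwise_iff_getElem.mp hu) i (i+1+t) _ _ (by omega)

theorem pv_sorted_split (u : List Int) (hu : u.Pairwise (· ≤ ·)) (i : Nat) (hi : i < u.length)
    (a b : Int) (ha : u[i] < a) (hb : u[i] < b) :
    PySem.List.sorted ((u ++ [a]) ++ [b]) (fun x => x) false
      = u.take (i+1) ++ PySem.List.sorted (u.drop (i+1) ++ [a, b]) (fun x => x) false := by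
  apply PySem.List.sorted_id_eq_of_perm_of_pairwise
  · have h1 : (u.take (i+1) ++ PySem.List.sorted (u.drop (i+1) ++ [a, b]) (fun x => x) false).Perm
        (u.take (i+1) ++ (u.drop (i+1) ++ [a, b])) :=
      List.Perm.append_left _ (PySem.List.sorted_perm _ _ _)
    have h2 : u.take (i+1) ++ (u.drop (i+1) ++ [a, b]) = u ++ [a, b] := by
      rw [← List.append_assoc, List.take_append_drop]
    rw [h2] at h1
    simpa using h1
  · rw [List.pairwise_append]
    refine ⟨hu.sublist (List.take_sublist _ _), PySem.List.sorted_pairwise _ _, ?_⟩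
    intro x hx y hy
    have hx' : x ≤ u[i] := pv_mem_take_le u hu i hi x hx
    have hy' : y ∈ u.drop (i+1) ++ [a, b] := (PySem.List.mem_sorted _ _ _ _).mp hy
    rcases List.mem_append.mp hy' with h | h
    · exact le_trans hx' (pv_mem_drop_ge u hu i hi y h)
    · simp only [List.mem_cons, List.not_mem_nil, or_false] at h
      rcases h with rfl | rfl
      · exact le_trans hx' (le_of_lt ha)
      · exact le_trans hx' (le_of_lt hb)

def pvUA : Nat → List Int
  | 0 => [1]
  | (i+1) =>
      let u := pvUA i
      let g := u.getD i 0
      PySem.List.sorted ((u ++ [2 * g + 1]) ++ [3 * g + 1]) (fun x => x) false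

theorem pvUA_length (i : Nat) : (pvUA i).length = 1 + 2 * i := by
  induction i with
  | zero => simp [pvUA]
  | succ i ih => simp [pvUA, PySem.List.length_sorted, ih]; omega

theorem pvUA_sorted (i : Nat) : (pvUA i).Pairwise (· ≤ ·) := by
  cases i with
  | zero => simp [pvUA]
  | succ i => exact PySem.List.sorted_pairwise _ _

theorem pvUA_pos (i : Nat) : ∀ x ∈ pvUA i, (1:Int) ≤ x := by
  induction i with
  | zero => simp [pvUA]
  | succ i ih =>
    intro x hx
    simp only [pvUA] at hx
    have hx' := (PySem.List.mem_sorted _ _ _ _).mp hx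
    have hg : (1:Int) ≤ (pvUA i).getD i 0 := by
      have hlen : i < (pvUA i).length := by rw [pvUA_length]; omega
      rw [List.getD_eq_getElem _ _ hlen]
      exact ih _ (List.getElem_mem hlen)
    rcases List.mem_append.mp hx' with h | h
    · rcases List.mem_append.mp h with h' | h'
      · exact ih x h'
      · simp only [List.mem_singleton] at h'; subst h'; omega
    · simp only [List.mem_singleton] at h; subst h; omega

theorem pvUA_take_succ (i : Nat) :
    (pvUA (i+1)).take (i+1) = (pvUA i).take (i+1) := by
  have hlen : i < (pvUA i).length := by rw [pvUA_length]; omega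
  have hg : (pvUA i).getD i 0 = (pvUA i)[i] := List.getD_eq_getElem _ _ hlen
  have hpos : (1:Int) ≤ (pvUA i)[i] := pvUA_pos i _ (List.getElem_mem hlen)
  have hsplit := pv_sorted_split (pvUA i) (pvUA_sorted i) i hlen
      (2 * (pvUA i).getD i 0 + 1) (3 * (pvUA i).getD i 0 + 1)
      (by rw [hg]; omega) (by rw [hg]; omega)
  show (PySem.List.sorted _ _ _).take (i+1) = _
  rw [hsplit, List.take_append_of_le_length (by simp [List.length_take]; omega),
      List.take_take]
  simp

theorem pvUA_take_stable (d i : Nat) :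
    (pvUA (i + d)).take (i+1) = (pvUA i).take (i+1) := by
  induction d with
  | zero => rfl
  | succ d ih =>
    have e : i + (d+1) = (i+d)+1 := by omega
    rw [e]
    have h1 : (pvUA ((i+d)+1)).take (i+1)
        = ((pvUA ((i+d)+1)).take ((i+d)+1)).take (i+1) := by
      rw [List.take_take]
      congr 1
      omega
    rw [h1, pvUA_take_succ (i+d), List.take_take,
        show min (i+1) (i+d+1) = i+1 by omega, ih]

theorem pvUA_getD_stable {i m : Nat} (h : i ≤ m) :
    (pvUA i).getD i 0 = (pvUA m).getD i 0 := by
  obtain ⟨d, rfl⟩ := Nat.exists_eq_add_of_le h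
  have hi : i < (pvUA i).length := by rw [pvUA_length]; omega
  have hm : i < (pvUA (i + d)).length := by rw [pvUA_length]; omega
  calc (pvUA i).getD i 0 = ((pvUA i).take (i+1)).getD i 0 := by
        rw [List.getD_eq_getElem _ _ hi,
            List.getD_eq_getElem _ _ (by simp [List.length_take]; omega)]
        simp [List.getElem_take]
    _ = ((pvUA (i + d)).take (i+1)).getD i 0 := by rw [pvUA_take_stable]
    _ = (pvUA (i + d)).getD i 0 := by
        rw [List.getD_eq_getElem _ _ (by simp [List.length_take]; omega),
            List.getD_eq_getElem _ _ hm]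
        simp [List.getElem_take]

theorem pvUA_perm (m : Nat) : ∀ i, i ≤ m →
    (pvUA i).Perm (1 :: (List.range i).flatMap
      (fun j => [2 * (pvUA m).getD j 0 + 1, 3 * (pvUA m).getD j 0 + 1])) := by
  intro i
  induction i with
  | zero => intro _; simp [pvUA]
  | succ i ih =>
    intro hle
    have hgs : (pvUA i).getD i 0 = (pvUA m).getD i 0 := pvUA_getD_stable (by omega)
    have h1 : (pvUA (i+1)).Perm
        ((pvUA i ++ [2 * (pvUA i).getD i 0 + 1]) ++ [3 * (pvUA i).getD i 0 + 1]) := by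
      simpa [pvUA] using PySem.List.sorted_perm _ _ _
    have h2 := (List.Perm.append_right [3 * (pvUA i).getD i 0 + 1]
        (List.Perm.append_right [2 * (pvUA i).getD i 0 + 1] (ih (by omega))))
    have h3 := h1.trans h2
    rw [hgs] at h3
    rw [List.range_succ]
    refine h3.trans (List.Perm.of_eq ?_)
    simp [List.flatMap_append]

theorem pv_flatMap_pair_perm (l : List Nat) (f g : Nat → Int) :
    (l.flatMap (fun j => [f j, g j])).Perm (l.map f ++ l.map g) := by
  induction l with
  | nil => simp
  | cons a l ih =>
    simp only [List.flatMap_cons, List.map_cons]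
    have h : ([f a, g a] ++ l.flatMap (fun j => [f j, g j])).Perm
        ([f a, g a] ++ (l.map f ++ l.map g)) := List.Perm.append_left _ ih
    refine List.Perm.trans h ?_
    show (f a :: g a :: (l.map f ++ l.map g)).Perm (f a :: l.map f ++ g a :: l.map g)
    simpa using List.Perm.cons (f a)
      (List.perm_middle.symm :
        (g a :: (l.map f ++ l.map g)).Perm (l.map f ++ g a :: l.map g))


theorem pv_foldl_range (m : Nat) :
    (List.range m).foldl
      (fun u k => PySem.List.sorted ((u ++ [2 * u.getD k 0 + 1]) ++ [3 * u.getD k 0 + 1])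
        (fun x => x) false) [1] = pvUA m := by
  induction m with
  | zero => rfl
  | succ m ih => rw [List.range_succ, List.foldl_append, ih]; rfl

theorem pvA_eq_uA (n : Int) (h : 0 < n) : dbl_linear_version n = pvUA n.toNat := by
  have hne : (n == 0) = false := by simp; omega
  unfold dbl_linear_version
  simp only [hne, if_false, Bool.false_eq_true]
  rw [PySem.List.pyRange_one]
  rw [List.foldl_map]
  rw [← pv_foldl_range n.toNat]
  congr 1
  · funext u k
    simp [PySem.List.pyGetD_natCast]
  · simp


theorem pv_getElem_mono (u : List Int) (hu : u.Pairwise (· ≤ ·)) {p q : Nat}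
    (hpq : p ≤ q) (hq : q < u.length) : u[p]'(by omega) ≤ u[q] := by
  rcases Nat.eq_or_lt_of_le hpq with rfl | h
  · exact le_refl _
  · exact (List.pairwise_iff_getElem.mp hu) p q _ _ h

theorem pv_mem_drop_ge' (u : List Int) (hu : u.Pairwise (· ≤ ·)) (d : Nat) (hd : d < u.length)
    (y : Int) (hy : y ∈ u.drop d) : u[d] ≤ y := by
  rw [List.mem_iff_getElem] at hy
  obtain ⟨t, ht, rfl⟩ := hy
  rw [List.getElem_drop]
  exact pv_getElem_mono u hu (Nat.le_add_right d t) _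

theorem pv_getD_take (L : List Int) (a n : Nat) (h : a < n) (h2 : a < L.length) :
    (L.take n).getD a 0 = L.getD a 0 := by
  rw [List.getD_eq_getElem _ _ (by simp [List.length_take]; omega),
      List.getD_eq_getElem _ _ h2]
  simp [List.getElem_take]

theorem pv_mem_stream (m i : Nat) (F : Nat → Int) (y : Int)
    (hy : y ∈ ((List.range m).drop i).map F) : ∃ j, i ≤ j ∧ j < m ∧ y = F j := by
  simp only [List.mem_map] at hy
  obtain ⟨j, hj, rfl⟩ := hy
  rw [List.mem_iff_getElem] at hj
  obtain ⟨t, ht, rfl⟩ := hj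
  refine ⟨i + t, Nat.le_add_right _ _, ?_, ?_⟩
  · simp [List.length_drop] at ht; omega
  · rw [List.getElem_drop, List.getElem_range]

theorem pv_range_drop_cons {m i : Nat} (h : i < m) :
    (List.range m).drop i = i :: (List.range m).drop (i+1) := by
  rw [List.drop_eq_getElem_cons (by simpa using h)]
  simp

theorem pvBLoop_inv (m : Nat) : ∀ N i2 i3 r,
    (m - i2) + (m - i3) ≤ N → i2 ≤ m → i3 ≤ m →
    r = (pvUA m).take (1 + i2 + i3) →
    ((pvUA m).drop (1 + i2 + i3)).Perm
      (((List.range m).drop i2).map (fun j => 2 * (pvUA m).getD j 0 + 1) ++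
       ((List.range m).drop i3).map (fun j => 3 * (pvUA m).getD j 0 + 1)) →
    pvBLoop m r i2 i3 = pvUA m := by
  intro N
  induction N with
  | zero =>
    intro i2 i3 r hN h2m h3m hr _
    have h2 : i2 = m := by omega
    have h3 : i3 = m := by omega
    subst h2; subst h3
    rw [pvBLoop, dif_neg (by omega)]
    rw [hr]
    exact List.take_of_length_le (by rw [pvUA_length]; omega)
  | succ N ih =>
    intro i2 i3 r hN h2m h3m hr hperm
    by_cases hg : i2 < m ∨ i3 < m
    · have hlen : (pvUA m).length = 1 + 2*m := pvUA_length m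
      have h1k : 1 + i2 + i3 < (pvUA m).length := by rw [hlen]; omega
      have hdropL : (pvUA m).drop (1+i2+i3)
          = (pvUA m)[1+i2+i3] :: (pvUA m).drop (1+i2+i3+1) :=
        List.drop_eq_getElem_cons h1k
      have hsorted := pvUA_sorted m
      -- r's reads agree with L's
      have hr2 : ∀ a, a ≤ i2 + i3 → r.getD a 0 = (pvUA m).getD a 0 := by
        intro a ham
        rw [hr]
        exact pv_getD_take _ _ _ (by omega) (by rw [hlen]; omega)
      rw [pvBLoop, dif_pos hg]
      by_cases h2 : m ≤ i3 ∨ (i2 < m ∧ 2 * r.getD i2 0 + 1 ≤ 3 * r.getD i3 0 + 1)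
      · -- take the 2-stream candidate
        have hi2m : i2 < m := by
          rcases h2 with h | h
          · rcases hg with hg' | hg'
            · exact hg'
            · omega
          · exact h.1
        have hc2 : 2 * r.getD i2 0 + 1 = 2 * (pvUA m).getD i2 0 + 1 := by rw [hr2 _ (by omega)]
        have hS2 : ((List.range m).drop i2).map (fun j => 2 * (pvUA m).getD j 0 + 1)
            = (2 * (pvUA m).getD i2 0 + 1) ::
              ((List.range m).drop (i2+1)).map (fun j => 2 * (pvUA m).getD j 0 + 1) := by
          rw [pv_range_drop_cons hi2m, List.map_cons]
        -- the next element of L is exactly c2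
        have hnext : (pvUA m)[1+i2+i3] = 2 * (pvUA m).getD i2 0 + 1 := by
          have hmemc : (2 * (pvUA m).getD i2 0 + 1) ∈ (pvUA m).drop (1+i2+i3) :=
            hperm.mem_iff.mpr (List.mem_append.mpr
              (Or.inl (by rw [hS2]; exact List.mem_cons_self)))
          have hle : (pvUA m)[1+i2+i3] ≤ 2 * (pvUA m).getD i2 0 + 1 :=
            pv_mem_drop_ge' _ hsorted _ h1k _ hmemc
          have hmemn : (pvUA m)[1+i2+i3] ∈ (pvUA m).drop (1+i2+i3) := by
            rw [hdropL]; exact List.mem_cons_self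
          have hge : 2 * (pvUA m).getD i2 0 + 1 ≤ (pvUA m)[1+i2+i3] := by
            have hmemn' := hperm.mem_iff.mp hmemn
            rcases List.mem_append.mp hmemn' with h | h
            · obtain ⟨j, hij, hjm, heq⟩ := pv_mem_stream _ _ _ _ h
              rw [heq]
              have : (pvUA m).getD i2 0 ≤ (pvUA m).getD j 0 := by
                rw [List.getD_eq_getElem _ _ (by omega), List.getD_eq_getElem _ _ (by omega)]
                exact pv_getElem_mono _ hsorted hij (by omega)
              omega
            · obtain ⟨j, hij, hjm, heq⟩ := pv_mem_stream _ _ _ _ h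
              rw [heq]
              rcases h2 with h' | ⟨_, hc⟩
              · omega
              · rw [hr2 _ (by omega), hr2 _ (by omega)] at hc
                have : (pvUA m).getD i3 0 ≤ (pvUA m).getD j 0 := by
                  rw [List.getD_eq_getElem _ _ (by omega), List.getD_eq_getElem _ _ (by omega)]
                  exact pv_getElem_mono _ hsorted hij (by omega)
                omega
          omega
        rw [if_pos h2]
        apply ih (i2+1) i3 _ (by omega) (by omega) h3m
        · rw [hc2, hr, ← hnext]
          have he : 1 + (i2+1) + i3 = (1+i2+i3) + 1 := by omega
          rw [he, List.take_add_one, List.getElem?_eq_getElem h1k]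
          rfl
        · have he : 1 + (i2+1) + i3 = (1+i2+i3) + 1 := by omega
          rw [he]
          have hperm' := hperm
          rw [hdropL, hS2, hnext] at hperm'
          exact hperm'.cons_inv
      · -- take the 3-stream candidate
        have hi3m : i3 < m := by
          rcases hg with h | h
          · by_contra hc; exact h2 (Or.inl (by omega))
          · exact h
        have hc3 : 3 * r.getD i3 0 + 1 = 3 * (pvUA m).getD i3 0 + 1 := by rw [hr2 _ (by omega)]
        have hS3 : ((List.range m).drop i3).map (fun j => 3 * (pvUA m).getD j 0 + 1)
            = (3 * (pvUA m).getD i3 0 + 1) ::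
              ((List.range m).drop (i3+1)).map (fun j => 3 * (pvUA m).getD j 0 + 1) := by
          rw [pv_range_drop_cons hi3m, List.map_cons]
        push Not at h2
        have h2' := h2.2
        have hnext : (pvUA m)[1+i2+i3] = 3 * (pvUA m).getD i3 0 + 1 := by
          have hmemc : (3 * (pvUA m).getD i3 0 + 1) ∈ (pvUA m).drop (1+i2+i3) :=
            hperm.mem_iff.mpr (List.mem_append.mpr
              (Or.inr (by rw [hS3]; exact List.mem_cons_self)))
          have hle : (pvUA m)[1+i2+i3] ≤ 3 * (pvUA m).getD i3 0 + 1 :=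
            pv_mem_drop_ge' _ hsorted _ h1k _ hmemc
          have hmemn : (pvUA m)[1+i2+i3] ∈ (pvUA m).drop (1+i2+i3) := by
            rw [hdropL]; exact List.mem_cons_self
          have hge : 3 * (pvUA m).getD i3 0 + 1 ≤ (pvUA m)[1+i2+i3] := by
            have hmemn' := hperm.mem_iff.mp hmemn
            rcases List.mem_append.mp hmemn' with h | h
            · obtain ⟨j, hij, hjm, heq⟩ := pv_mem_stream _ _ _ _ h
              rw [heq]
              have hi2m : i2 < m := by omega
              have hlt := h2' hi2m
              rw [hr2 _ (by omega), hr2 _ (by omega)] at hlt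
              have : (pvUA m).getD i2 0 ≤ (pvUA m).getD j 0 := by
                rw [List.getD_eq_getElem _ _ (by omega), List.getD_eq_getElem _ _ (by omega)]
                exact pv_getElem_mono _ hsorted hij (by omega)
              omega
            · obtain ⟨j, hij, hjm, heq⟩ := pv_mem_stream _ _ _ _ h
              rw [heq]
              have : (pvUA m).getD i3 0 ≤ (pvUA m).getD j 0 := by
                rw [List.getD_eq_getElem _ _ (by omega), List.getD_eq_getElem _ _ (by omega)]
                exact pv_getElem_mono _ hsorted hij (by omega)
              omega
          omega
        rw [if_neg (by push Not; exact h2)]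
        apply ih i2 (i3+1) _ (by omega) h2m (by omega)
        · rw [hc3, hr, ← hnext]
          have he : 1 + i2 + (i3+1) = (1+i2+i3) + 1 := by omega
          rw [he, List.take_add_one, List.getElem?_eq_getElem h1k]
          rfl
        · have he : 1 + i2 + (i3+1) = (1+i2+i3) + 1 := by omega
          rw [he]
          have hperm' := hperm
          rw [hdropL, hS3, hnext] at hperm'
          exact (hperm'.trans List.perm_middle).cons_inv
    · have h2 : i2 = m := by omega
      have h3 : i3 = m := by omega
      subst h2; subst h3
      rw [pvBLoop, dif_neg (by omega)]
      rw [hr]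
      exact List.take_of_length_le (by rw [pvUA_length]; omega)

theorem pvUA_head (m : Nat) : (pvUA m)[0]'(by rw [pvUA_length]; omega) = 1 := by
  have hlen : 0 < (pvUA m).length := by rw [pvUA_length]; omega
  have h1 : (1:Int) ∈ pvUA m := by
    rw [(pvUA_perm m m (le_refl m)).mem_iff]
    exact List.mem_cons_self
  have hle : (pvUA m)[0] ≤ 1 := by
    rw [List.mem_iff_getElem] at h1
    obtain ⟨t, ht, heq⟩ := h1
    rw [← heq]
    exact pv_getElem_mono _ (pvUA_sorted m) (Nat.zero_le t) ht
  have hge : 1 ≤ (pvUA m)[0] := pvUA_pos m _ (List.getElem_mem hlen)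
  omega


theorem pv_main (n : Int) : dbl_linear_version n = dbl_linear_version_alt n := by
  rcases lt_trichotomy n 0 with hn | hn | hn
  · unfold dbl_linear_version dbl_linear_version_alt
    rw [if_neg (by simp; omega)]
    rw [PySem.List.pyRange_one_eq_nil (by omega)]
    have hm : n.toNat = 0 := by omega
    rw [hm, pvBLoop, dif_neg (by omega)]
    rfl
  · subst hn
    unfold dbl_linear_version dbl_linear_version_alt
    rw [if_pos (by simp)]
    rw [show (0:Int).toNat = 0 from rfl, pvBLoop, dif_neg (by omega)]
  · rw [pvA_eq_uA n hn]
    unfold dbl_linear_version_alt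
    set m := n.toNat with hm
    have hlen : (pvUA m).length = 1 + 2*m := pvUA_length m
    have h0 : 0 < (pvUA m).length := by omega
    have hds : pvUA m = 1 :: (pvUA m).drop 1 := by
      have := List.drop_eq_getElem_cons h0
      rw [List.drop_zero] at this
      rw [pvUA_head m] at this
      exact this
    have htake : [(1:Int)] = (pvUA m).take (1 + 0 + 0) := by
      conv_rhs => rw [hds]
      rfl
    have hflat := pvUA_perm m m (le_refl m)
    have hcons : ((1:Int) :: (pvUA m).drop 1).Perm
        (1 :: (List.range m).flatMap
          (fun j => [2 * (pvUA m).getD j 0 + 1, 3 * (pvUA m).getD j 0 + 1])) := by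
      rw [← hds]; exact hflat
    have hdrop1 : ((pvUA m).drop (1 + 0 + 0)).Perm
        (((List.range m).drop 0).map (fun j => 2 * (pvUA m).getD j 0 + 1) ++
         ((List.range m).drop 0).map (fun j => 3 * (pvUA m).getD j 0 + 1)) := by
      rw [List.drop_zero]
      exact hcons.cons_inv.trans (pv_flatMap_pair_perm _ _ _)
    exact (pvBLoop_inv m (2*m) 0 0 [1] (by omega) (by omega) (by omega) htake hdrop1).symm

-- ===== VERDICT (by name: the statement is the Claim_ definition above) =====
theorem dbl_linear_version_spec : Claim_equal_dbl_linear_version := by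
  intro n _
  exact pv_main n
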